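-- pv_equiv track=rewrite | github.com/aglabx/varprofiler | visualize_motifs_in_satellites.py | find_motif_positions
-- ===== SOURCE A (Python) =====
-- def reverse_complement(seq):
--     """Get reverse complement of DNA sequence."""
--     complement = {'A': 'T', 'T': 'A', 'G': 'C', 'C': 'G',
--                   'N': 'N', 'R': 'Y', 'Y': 'R', 'S': 'S',
--                   'W': 'W', 'K': 'M', 'M': 'K', 'B': 'V',
--                   'V': 'B', 'D': 'H', 'H': 'D'}
--     return ''.join(complement.get(c.upper(), c) for c in seq[::-1])
--
-- def find_motif_positions(sequence, motif, both_strands=True):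
--     """
--     Find all positions of a motif in a sequence.
--     Returns list of (start, end) positions.
--     """
--     positions = []
--     seq_upper = sequence.upper()
--     motif_upper = motif.upper()
--     motif_len = len(motif_upper)
--
--     # Find forward strand matches
--     start = 0
--     while True:
--         pos = seq_upper.find(motif_upper, start)
--         if pos == -1:
--             break
--         positions.append((pos, pos + motif_len))
--         start = pos + 1
--
--     # Find reverse strand matches if requested
--     if both_strands:
--         rc_motif = reverse_complement(motif_upper)
--         if rc_motif != motif_upper:  # Avoid double marking palindromes
--             start = 0
--             while True:
--                 pos = seq_upper.find(rc_motif, start)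
--                 if pos == -1:
--                     break
--                 positions.append((pos, pos + motif_len))
--                 start = pos + 1
--
--     return positions
-- ===== SOURCE B (Python) =====
-- def reverse_complement(seq):
--     """Get reverse complement of DNA sequence."""
--     complement = {'A': 'T', 'T': 'A', 'G': 'C', 'C': 'G',
--                   'N': 'N', 'R': 'Y', 'Y': 'R', 'S': 'S',
--                   'W': 'W', 'K': 'M', 'M': 'K', 'B': 'V',
--                   'V': 'B', 'D': 'H', 'H': 'D'}
--     return ''.join(complement.get(c.upper(), c) for c in seq[::-1])
--
-- def find_motif_positions(sequence, motif, both_strands=True):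
--     """Find all (start, end) motif positions by one direct index scan per target."""
--     seq = sequence.upper()
--     mot = motif.upper()
--     m = len(mot)
--     n = len(seq)
--     targets = [mot]
--     if both_strands:
--         rc = reverse_complement(mot)
--         if rc != mot:
--             targets.append(rc)
--     out = []
--     for t in targets:
--         out.extend((i, i + m) for i in range(n - m + 1) if seq[i:i + m] == t)
--     return out
-- ===== Notes on version B (the rewrite author's own statement) =====
-- stated objective: alternative
-- what changed: replaces A's repeated str.find restart loop (find, record, resume at pos+1) by a single direct index scan per target: one pass over range(n-m+1) comparing the slice seq[i:i+m] against each target, collecting matches with a comprehension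
import Mathlib
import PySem

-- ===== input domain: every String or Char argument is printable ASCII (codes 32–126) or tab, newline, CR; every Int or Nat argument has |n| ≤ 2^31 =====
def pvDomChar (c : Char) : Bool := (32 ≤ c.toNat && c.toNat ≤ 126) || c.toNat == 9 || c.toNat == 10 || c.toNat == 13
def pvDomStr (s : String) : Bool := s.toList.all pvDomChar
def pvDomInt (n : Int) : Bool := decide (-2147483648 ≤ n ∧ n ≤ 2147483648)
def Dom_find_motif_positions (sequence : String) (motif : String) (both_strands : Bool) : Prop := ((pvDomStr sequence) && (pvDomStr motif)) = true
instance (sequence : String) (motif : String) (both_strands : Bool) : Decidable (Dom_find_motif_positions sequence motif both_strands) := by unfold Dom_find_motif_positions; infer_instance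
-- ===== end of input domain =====

-- B replaces A's repeated str.find restart loop by one direct index scan per target
-- (slice compare at every candidate start); same result, no speed claim ("alternative").

-- ===== PORT A =====
-- shared module helper reverse_complement (used verbatim by both Pythons)
def pvComplement : PySem.Dict Char Char :=
  PySem.Dict.mk [('A','T'), ('T','A'), ('G','C'), ('C','G'),
                 ('N','N'), ('R','Y'), ('Y','R'), ('S','S'),
                 ('W','W'), ('K','M'), ('M','K'), ('B','V'),
                 ('V','B'), ('D','H'), ('H','D')]

def reverse_complement (seq : List Char) : List Char :=
  (seq.reverse).map (fun c => PySem.Dict.getD pvComplement (PySem.Chars.upperChar c) c)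

-- A's 'while True: pos = seq.find(motif, start); …' loop; fuel bounds the number of
-- iterations (each iteration moves start past the previous hit, so seq.length + 2 suffices)
def pvFindLoop (s t : List Char) (m : Int) : Nat → Int → List (Int × Int) → List (Int × Int)
  | 0, _, positions => positions
  | fuel + 1, start, positions =>
    let pos := PySem.Chars.findFrom s t start
    if pos = -1 then positions
    else pvFindLoop s t m fuel (pos + 1) (positions ++ [(pos, pos + m)])

def find_motif_positions (sequence : String) (motif : String) (both_strands : Bool) : List (Int × Int) :=
  let seq_upper := PySem.Chars.upper sequence.toList
  let motif_upper := PySem.Chars.upper motif.toList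
  let motif_len : Int := motif_upper.length
  let positions := pvFindLoop seq_upper motif_upper motif_len (seq_upper.length + 2) 0 []
  if both_strands then
    let rc_motif := reverse_complement motif_upper
    if rc_motif ≠ motif_upper then
      pvFindLoop seq_upper rc_motif motif_len (seq_upper.length + 2) 0 positions
    else positions
  else positions

-- ===== PORT B =====
-- B's '(i, i+m) for i in range(n - m + 1) if seq[i:i+m] == t'
def pvScanHits (s t : List Char) (m : Int) : List (Int × Int) :=
  (PySem.List.pyRange 0 ((s.length : Int) - m + 1)).filterMap
    (fun i => if PySem.List.slice s (some i) (some (i + m)) = t then some (i, i + m) else none)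

def find_motif_positions_alt (sequence : String) (motif : String) (both_strands : Bool) : List (Int × Int) :=
  let seq := PySem.Chars.upper sequence.toList
  let mot := PySem.Chars.upper motif.toList
  let m : Int := mot.length
  let targets :=
    if both_strands then
      let rc := reverse_complement mot
      if rc ≠ mot then [mot, rc] else [mot]
    else [mot]
  targets.foldl (fun out t => out ++ pvScanHits seq t m) []

-- ===== PRECONDITION & SPEC =====
def Spec_find_motif_positions (sequence : String) (motif : String) (both_strands : Bool) (out : List (Int × Int)) : Prop := out = find_motif_positions_alt sequence motif both_strands
instance (sequence : String) (motif : String) (both_strands : Bool) (out : List (Int × Int)) : Decidable (Spec_find_motif_positions sequence motif both_strands out) := by unfold Spec_find_motif_positions; infer_instance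

-- ===== CLAIM (what is proved, stated in full; the proofs are below) =====
def Claim_equal_find_motif_positions : Prop := ∀ (sequence : String) (motif : String) (both_strands : Bool), Dom_find_motif_positions sequence motif both_strands → Spec_find_motif_positions sequence motif both_strands (find_motif_positions sequence motif both_strands)

-- ===== LEMMAS AND PROOFS =====

theorem pvReverse_complement_length (t : List Char) :
    (reverse_complement t).length = t.length := by
  simp [reverse_complement]

-- findFrom with start past the end of the string is -1 (CPython's rule)
theorem pvFindFrom_past (s sub : List Char) (k : Nat) (h : s.length < k) :
    PySem.Chars.findFrom s sub k = -1 := by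
  unfold PySem.Chars.findFrom
  have h1 : ¬ ((k : Int) < 0) := by omega
  have h2 : (s.length : Int) < (k : Int) := by exact_mod_cast h
  simp [h1, h2]

-- B's slice compare at index i succeeds iff the target is a prefix of s.drop i
theorem pvSlice_eq_iff (s t : List Char) (i : Nat) :
    (PySem.List.slice s (some (i : Int)) (some ((i : Int) + (t.length : Int))) = t)
      ↔ t <+: s.drop i := by
  rw [PySem.List.slice_toNat s (by positivity) (by positivity)]
  have h1 : ((i : Int) + (t.length : Int)).toNat - ((i : Int)).toNat = t.length := by omega
  have h2 : ((i : Int)).toNat = i := by omega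
  rw [h1, h2, List.prefix_iff_eq_take, eq_comm]

-- the core invariant: A's find/restart loop from 'start' produces exactly B's
-- filterMap over the candidate indices ≥ start, appended to the accumulator
theorem pvFindLoop_eq (s t : List Char) (m : Int) (hm : m = (t.length : Int)) :
    ∀ (fuel start : Nat) (acc : List (Int × Int)),
      s.length + 1 - start < fuel → start ≤ s.length + 1 →
      pvFindLoop s t m fuel (start : Int) acc
        = acc ++ (PySem.List.pyRange (start : Int) ((s.length : Int) - m + 1)).filterMap
            (fun i => if PySem.List.slice s (some i) (some (i + m)) = t then some (i, i + m) else none) := by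
  intro fuel
  induction fuel with
  | zero => intro start acc h _; omega
  | succ fuel ih =>
    intro start acc hfuel hstart
    show (if PySem.Chars.findFrom s t (start : Int) = -1 then acc
          else pvFindLoop s t m fuel (PySem.Chars.findFrom s t (start : Int) + 1)
                 (acc ++ [(PySem.Chars.findFrom s t (start : Int),
                           PySem.Chars.findFrom s t (start : Int) + m)])) = _
    by_cases hpos : PySem.Chars.findFrom s t (start : Int) = -1
    · rw [if_pos hpos]
      have hnil : (PySem.List.pyRange (start : Int) ((s.length : Int) - m + 1)).filterMap
            (fun i => if PySem.List.slice s (some i) (some (i + m)) = t then some (i, i + m) else none) = [] := by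
        rw [List.filterMap_eq_nil_iff]
        intro i hi
        rw [PySem.List.mem_pyRange_one] at hi
        by_cases hle : start ≤ s.length
        · -- no occurrence of t at or after start
          have hno : ¬ t <:+: s.drop start :=
            (PySem.Chars.findFrom_natCast_eq_neg_one_iff s t start hle).mp hpos
          have h0 : (0 : Int) ≤ i := le_trans (by exact_mod_cast Nat.zero_le start) hi.1
          have hi' : i = ((i.toNat : Nat) : Int) := by omega
          rw [if_neg]
          rw [hi', hm, pvSlice_eq_iff]
          intro hpre
          exact hno (List.IsInfix.trans hpre.isInfix
            (by
              have : s.drop i.toNat = (s.drop start).drop (i.toNat - start) := by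
                rw [List.drop_drop]; congr 1; omega
              rw [this]; exact (List.drop_suffix _ _).isInfix))
        · -- start = s.length + 1: the candidate range is empty
          exfalso
          have : i < (s.length : Int) - m + 1 := hi.2
          have hm0 : (0 : Int) ≤ m := by rw [hm]; positivity
          omega
      rw [hnil, List.append_nil]
    · rw [if_neg hpos]
      have hle : start ≤ s.length := by
        by_contra hgt
        exact hpos (pvFindFrom_past s t start (by omega))
      obtain ⟨hge, hpre, hmin⟩ := PySem.Chars.findFrom_natCast_spec s t start hle hpos
      set pos := PySem.Chars.findFrom s t (start : Int) with hposdef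
      have hpos0 : (0 : Int) ≤ pos := le_trans (by exact_mod_cast Nat.zero_le start) hge
      have hposcast : pos = ((pos.toNat : Nat) : Int) := by omega
      -- pos is a real index: pos + |t| ≤ |s|
      have hlen : pos.toNat + t.length ≤ s.length := by
        have h1 : t.length ≤ (s.drop pos.toNat).length := hpre.length_le
        rw [List.length_drop] at h1
        have h2 : pos.toNat ≤ s.length := by
          have := PySem.Chars.findFrom_natCast s t start hle
          have hfl := PySem.Chars.find_le_length (List.drop start s) t
          rw [List.length_drop] at hfl
          rw [hposdef, this, if_neg]
          · omega
          · intro hc; exact hpos (by rw [hposdef, this, if_pos hc])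
        omega
      have hposlt : pos < (s.length : Int) - m + 1 := by rw [hm]; omega
      -- split the candidate range at pos
      rw [PySem.List.pyRange_one_append (start : Int) pos ((s.length : Int) - m + 1) hge (by omega),
          List.filterMap_append]
      have hnil2 : (PySem.List.pyRange (start : Int) pos).filterMap
            (fun i => if PySem.List.slice s (some i) (some (i + m)) = t then some (i, i + m) else none) = [] := by
        rw [List.filterMap_eq_nil_iff]
        intro i hi
        rw [PySem.List.mem_pyRange_one] at hi
        have h0 : (0 : Int) ≤ i := le_trans (by exact_mod_cast Nat.zero_le start) hi.1
        have hi' : i = ((i.toNat : Nat) : Int) := by omega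
        rw [if_neg]
        rw [hi', hm, pvSlice_eq_iff]
        exact hmin i.toNat (by omega) (by omega)
      rw [hnil2, List.nil_append,
          PySem.List.pyRange_one_cons hposlt, List.filterMap_cons]
      have hhit : (if PySem.List.slice s (some pos) (some (pos + m)) = t then some (pos, pos + m) else none)
          = some (pos, pos + m) := by
        rw [if_pos]
        rw [hposcast, hm, pvSlice_eq_iff]
        exact hpre
      rw [hhit]
      have hrec := ih pos.toNat.succ (acc ++ [(pos, pos + m)]) (by omega) (by omega)
      have hcast : ((pos.toNat.succ : Nat) : Int) = pos + 1 := by omega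
      rw [hcast] at hrec
      rw [hrec, List.append_assoc, List.singleton_append]

-- top-level equality of the two ports (everywhere, no precondition needed)
theorem pvPorts_eq (sequence motif : String) (both_strands : Bool) :
    find_motif_positions sequence motif both_strands
      = find_motif_positions_alt sequence motif both_strands := by
  unfold find_motif_positions find_motif_positions_alt
  set s := PySem.Chars.upper sequence.toList with hs
  set t := PySem.Chars.upper motif.toList with ht
  have hfwd := pvFindLoop_eq s t (t.length : Int) rfl (s.length + 2) 0 [] (by omega) (by omega)
  simp only [Nat.cast_zero] at hfwd
  have hrcl : ((t.length : Nat) : Int) = ((reverse_complement t).length : Int) := by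
    rw [pvReverse_complement_length]
  have hrev := pvFindLoop_eq s (reverse_complement t) (t.length : Int) hrcl
    (s.length + 2) 0 (pvFindLoop s t (t.length : Int) (s.length + 2) 0 [])
    (by omega) (by omega)
  simp only [Nat.cast_zero] at hrev
  by_cases hbs : both_strands = true
  · by_cases hrc : reverse_complement t ≠ t
    · simp only [hbs, if_true]
      rw [if_pos hrc, if_pos hrc]
      simp only [List.foldl_cons, List.foldl_nil]
      rw [hrev, hfwd, List.nil_append]
      rfl
    · simp only [hbs, if_neg hrc]
      rw [hfwd]
      rfl
  · simp only [if_neg hbs, List.foldl_cons, List.foldl_nil]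
    rw [hfwd, List.nil_append]
    rfl

-- ===== VERDICT (by name: the statement is the Claim_ definition above) =====
theorem find_motif_positions_spec : Claim_equal_find_motif_positions := by
  intro sequence motif both_strands _
  unfold Spec_find_motif_positions
  exact pvPorts_eq sequence motif both_strands
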